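-- pv_equiv track=rewrite | github.com/CooperMetts/comp110-21f-workspace | projects/pj01/data_utils.py | no_count
-- ===== SOURCE A (Python) =====
-- def no_count(responses_principles: dict[str, list[str]], responses_a: dict[str, list[str]], key_1: str, key_2: str) -> list[int]:
--     occurences: list[int] = []
--     i: int = 0
--     count: int = 1
--     while i < len(responses_a[key_2]):
--         if responses_principles[key_1][i] == "No" and responses_a[key_2][i] == "No":
--             occurences.append(count)
--             count = count + 1
--             i = i + 1
--         else:
--             i = i + 1
--     return occurences
-- ===== SOURCE B (Python) =====
-- def no_count(responses_principles: dict[str, list[str]], responses_a: dict[str, list[str]], key_1: str, key_2: str) -> list[int]: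
--     principles = responses_principles[key_1]
--     answers = responses_a[key_2]
--     no_principles = {i for i, v in enumerate(principles) if v == "No"}
--     no_answers = {i for i, v in enumerate(answers) if v == "No"}
--     k = len(no_principles & no_answers)
--     return list(range(1, k + 1))
-- ===== Notes on version B (the rewrite author's own statement) =====
-- stated objective: alternative
-- what changed: B replaces A's single while-loop scan (index, running counter, appends) by a set-based computation: it builds the set of indices holding "No" in each list, takes the set intersection, and returns range(1, len(intersection)+1).
import Mathlib
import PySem

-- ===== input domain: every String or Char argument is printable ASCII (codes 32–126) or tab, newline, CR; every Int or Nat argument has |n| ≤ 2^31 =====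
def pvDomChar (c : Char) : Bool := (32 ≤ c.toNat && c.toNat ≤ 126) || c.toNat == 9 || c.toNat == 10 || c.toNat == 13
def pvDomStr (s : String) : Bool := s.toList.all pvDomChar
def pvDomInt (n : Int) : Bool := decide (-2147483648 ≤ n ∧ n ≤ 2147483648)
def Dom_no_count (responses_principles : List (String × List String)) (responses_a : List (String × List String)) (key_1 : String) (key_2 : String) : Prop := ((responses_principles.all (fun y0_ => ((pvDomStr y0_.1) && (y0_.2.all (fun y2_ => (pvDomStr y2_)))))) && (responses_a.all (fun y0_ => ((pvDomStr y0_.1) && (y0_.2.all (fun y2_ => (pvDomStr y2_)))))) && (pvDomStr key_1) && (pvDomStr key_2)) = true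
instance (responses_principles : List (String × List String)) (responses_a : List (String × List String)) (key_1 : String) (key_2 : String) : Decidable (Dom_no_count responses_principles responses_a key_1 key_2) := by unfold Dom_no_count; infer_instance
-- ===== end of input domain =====

-- B replaces A's while loop (index, running counter, appends) by a set computation: the set of
-- "No"-indices of each list, their intersection, and range(1, len(intersection)+1); same cost.

-- ===== PORT A =====
-- the while loop of A: i, count, and the accumulating occurrences list (count is a Nat: Python's count stays ≥ 1)
def noCountLoop (l1 l2 : List String) (i count : Nat) (occ : List Int) : List Int :=
  if i < l2.length then
    if l1.getD i "" = "No" ∧ l2.getD i "" = "No" then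
      noCountLoop l1 l2 (i + 1) (count + 1) (occ ++ [(count : Int)])
    else
      noCountLoop l1 l2 (i + 1) count occ
  else occ
termination_by l2.length - i

def no_count (responses_principles : List (String × List String)) (responses_a : List (String × List String)) (key_1 : String) (key_2 : String) : List Int :=
  let l1 := ((PySem.Dict.mk responses_principles).get? key_1).getD []
  let l2 := ((PySem.Dict.mk responses_a).get? key_2).getD []
  noCountLoop l1 l2 0 1 []

-- ===== PORT B =====
-- the comprehension {i for i, v in enumerate(l) if v == "No"}: the index list, made a set
def noIdx (l : List String) : PySem.Set Int :=
  PySem.Set.ofList (((PySem.List.enumerate l 0).filter (fun pv => pv.2 == "No")).map (fun pv => pv.1))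

def no_count_alt (responses_principles : List (String × List String)) (responses_a : List (String × List String)) (key_1 : String) (key_2 : String) : List Int :=
  let principles := ((PySem.Dict.mk responses_principles).get? key_1).getD []
  let answers := ((PySem.Dict.mk responses_a).get? key_2).getD []
  let noPrinciples := noIdx principles
  let noAnswers := noIdx answers
  let k : Int := PySem.Set.len (PySem.Set.inter noPrinciples noAnswers)
  PySem.List.pyRange 1 (k + 1) 1

-- ===== PRECONDITION & SPEC =====
-- Pre_ excludes exactly the inputs where A raises: a missing key (KeyError) or a
-- responses_principles[key_1] shorter than responses_a[key_2] (IndexError).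
def Pre_no_count (responses_principles : List (String × List String)) (responses_a : List (String × List String)) (key_1 : String) (key_2 : String) : Prop :=
  ((PySem.Dict.mk responses_principles).get? key_1).isSome = true ∧
  ((PySem.Dict.mk responses_a).get? key_2).isSome = true ∧
  (((PySem.Dict.mk responses_a).get? key_2).getD []).length ≤ (((PySem.Dict.mk responses_principles).get? key_1).getD []).length
instance (responses_principles : List (String × List String)) (responses_a : List (String × List String)) (key_1 : String) (key_2 : String) : Decidable (Pre_no_count responses_principles responses_a key_1 key_2) := by unfold Pre_no_count; infer_instance

def pvWitness_no_count : (List (String × List String)) × (List (String × List String)) × String × String :=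
  ([("q", ["No", "Yes", "No"])], [("r", ["No", "No", "No"])], "q", "r")

def Spec_no_count (responses_principles : List (String × List String)) (responses_a : List (String × List String)) (key_1 : String) (key_2 : String) (out : List Int) : Prop := out = no_count_alt responses_principles responses_a key_1 key_2
instance (responses_principles : List (String × List String)) (responses_a : List (String × List String)) (key_1 : String) (key_2 : String) (out : List Int) : Decidable (Spec_no_count responses_principles responses_a key_1 key_2 out) := by unfold Spec_no_count; infer_instance

-- ===== CLAIM (what is proved, stated in full; the proofs are below) =====
def Claim_equal_no_count : Prop := ∀ (responses_principles : List (String × List String)) (responses_a : List (String × List String)) (key_1 : String) (key_2 : String), Dom_no_count responses_principles responses_a key_1 key_2 → Pre_no_count responses_principles responses_a key_1 key_2 → Spec_no_count responses_principles responses_a key_1 key_2 (no_count responses_principles responses_a key_1 key_2)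


-- ===== LEMMAS AND PROOFS =====

-- unfolding the index comprehension on a cons cell
theorem noIdxList_cons (v : String) (vs : List String) (s : Int) :
    ((PySem.List.enumerate (v :: vs) s).filter (fun pv => pv.2 == "No")).map (fun pv => pv.1)
      = if v = "No" then s :: ((PySem.List.enumerate vs (s+1)).filter (fun pv => pv.2 == "No")).map (fun pv => pv.1)
        else ((PySem.List.enumerate vs (s+1)).filter (fun pv => pv.2 == "No")).map (fun pv => pv.1) := by
  rw [PySem.List.enumerate_cons, List.filter_cons]
  by_cases h : v = "No" <;> simp [h]

-- every collected index is ≥ the enumeration start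
theorem noIdxList_ge (l : List String) (s : Int) :
    ∀ j ∈ ((PySem.List.enumerate l s).filter (fun pv => pv.2 == "No")).map (fun pv => pv.1), s ≤ j := by
  induction l generalizing s with
  | nil => simp [PySem.List.enumerate]
  | cons v vs ih =>
    intro j hj
    rw [noIdxList_cons] at hj
    by_cases h : v = "No"
    · rw [if_pos h] at hj
      rcases List.mem_cons.mp hj with h' | h'
      · omega
      · have := ih (s+1) j h'; omega
    · rw [if_neg h] at hj
      have := ih (s+1) j hj; omega

-- the collected indices are strictly increasing, hence nodup
theorem noIdxList_nodup (l : List String) (s : Int) :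
    (((PySem.List.enumerate l s).filter (fun pv => pv.2 == "No")).map (fun pv => pv.1)).Nodup := by
  induction l generalizing s with
  | nil => simp [PySem.List.enumerate]
  | cons v vs ih =>
    rw [noIdxList_cons]
    by_cases h : v = "No"
    · rw [if_pos h]
      refine List.nodup_cons.mpr ⟨?_, ih (s+1)⟩
      intro hmem
      have := noIdxList_ge vs (s+1) s hmem
      omega
    · rw [if_neg h]; exact ih (s+1)

-- the intersection size is the number of positions where both lists hold "No"
theorem inter_count (p a : List String) (s : Int) (h : a.length ≤ p.length) :
    ((((PySem.List.enumerate p s).filter (fun pv => pv.2 == "No")).map (fun pv => pv.1)).filter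
        (fun i => PySem.Set.contains (((PySem.List.enumerate a s).filter (fun pv => pv.2 == "No")).map (fun pv => pv.1)) i)).length
      = (p.zip a).countP (fun pa => pa.1 == "No" && pa.2 == "No") := by
  induction p generalizing a s with
  | nil =>
    have : a = [] := List.eq_nil_of_length_eq_zero (by simpa using h)
    subst this
    simp [PySem.List.enumerate]
  | cons v vs ih =>
    cases a with
    | nil => simp [PySem.List.enumerate]
    | cons b bs =>
      have hlen : bs.length ≤ vs.length := by simpa using h
      rw [noIdxList_cons v vs s, noIdxList_cons b bs s]
      have hcongr : ∀ t : List Int,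
          ((((PySem.List.enumerate vs (s+1)).filter (fun pv => pv.2 == "No")).map (fun pv => pv.1)).filter
            (fun i => PySem.Set.contains (s :: t) i)).length
          = ((((PySem.List.enumerate vs (s+1)).filter (fun pv => pv.2 == "No")).map (fun pv => pv.1)).filter
            (fun i => PySem.Set.contains t i)).length := by
        intro t
        congr 1
        apply List.filter_congr
        intro j hj
        have hge := noIdxList_ge vs (s+1) j hj
        simp only [PySem.Set.contains_eq_listContains, List.contains_cons]
        have : (j == s) = false := by simp; omega
        rw [this]; simp
      by_cases hv : v = "No" <;> by_cases hb : b = "No"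
      · rw [if_pos hv, if_pos hb, List.filter_cons]
        have hs : PySem.Set.contains (s :: ((PySem.List.enumerate bs (s+1)).filter (fun pv => pv.2 == "No")).map (fun pv => pv.1)) s = true := by
          simp [PySem.Set.contains_eq_listContains]
        rw [hs]
        simp only [if_true, List.length_cons]
        rw [hcongr, ih bs (s+1) hlen]
        simp [hv, hb]
      · rw [if_pos hv, if_neg hb, List.filter_cons]
        have hsmem : s ∉ ((PySem.List.enumerate bs (s+1)).filter (fun pv => pv.2 == "No")).map (fun pv => pv.1) := by
          intro hmem
          have := noIdxList_ge bs (s+1) s hmem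
          omega
        have hs : PySem.Set.contains (((PySem.List.enumerate bs (s+1)).filter (fun pv => pv.2 == "No")).map (fun pv => pv.1)) s = false := by
          simpa [PySem.Set.contains_eq_listContains] using hsmem
        rw [hs]
        simp only [Bool.false_eq_true, if_false]
        rw [ih bs (s+1) hlen]
        simp [hb]
      · rw [if_neg hv, if_pos hb]
        rw [hcongr, ih bs (s+1) hlen]
        simp [hv]
      · rw [if_neg hv, if_neg hb]
        rw [ih bs (s+1) hlen]
        simp [hv]

-- loop invariant: A's loop emits occ ++ [count, count+1, …] with one entry per
-- remaining double-No position
theorem loop_eq (l1 l2 : List String) (i count : Nat) (occ : List Int)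
    (hlen : l2.length ≤ l1.length) (hi : i ≤ l2.length) :
    noCountLoop l1 l2 i count occ
      = occ ++ PySem.List.pyRange (count : Int)
          ((count : Int) + (((l1.zip l2).drop i).countP (fun pa => pa.1 == "No" && pa.2 == "No") : Int)) 1 := by
  by_cases h : i < l2.length
  · have hil1 : i < l1.length := by omega
    have hzi : i < (l1.zip l2).length := by simp [List.length_zip]; omega
    have hdrop : (l1.zip l2).drop i = (l1[i], l2[i]) :: (l1.zip l2).drop (i + 1) := by
      rw [List.drop_eq_getElem_cons hzi]
      simp [List.getElem_zip]
    have g1 : l1.getD i "" = l1[i] := List.getD_eq_getElem l1 "" hil1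
    have g2 : l2.getD i "" = l2[i] := List.getD_eq_getElem l2 "" h
    rw [noCountLoop]
    rw [if_pos h]
    by_cases hm : l1.getD i "" = "No" ∧ l2.getD i "" = "No"
    · rw [if_pos hm]
      rw [loop_eq l1 l2 (i+1) (count+1) _ hlen (by omega)]
      rw [hdrop]
      have hm1 : l1[i] = "No" := g1 ▸ hm.1
      have hm2 : l2[i] = "No" := g2 ▸ hm.2
      have hc : (((l1[i], l2[i]) : String × String).1 == "No" && (l1[i], l2[i]).2 == "No") = true := by
        simp [hm1, hm2]
      simp only [List.countP_cons, hc, if_true]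
      rw [List.append_assoc]
      congr 1
      have hlt : (count : Int) < (count : Int) + (((l1.zip l2).drop (i+1)).countP (fun pa => pa.1 == "No" && pa.2 == "No") : Int) + 1 := by
        have := Int.natCast_nonneg (((l1.zip l2).drop (i+1)).countP (fun pa => pa.1 == "No" && pa.2 == "No"))
        omega
      rw [show ((count : Int) + (((l1.zip l2).drop (i+1)).countP (fun pa => pa.1 == "No" && pa.2 == "No") + 1 : Nat) : Int)
            = (count : Int) + (((l1.zip l2).drop (i+1)).countP (fun pa => pa.1 == "No" && pa.2 == "No") : Int) + 1 by push_cast; ring]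
      rw [PySem.List.pyRange_one_cons hlt]
      simp only [List.singleton_append, List.cons.injEq, true_and]
      congr 1
      push_cast; ring
    · rw [if_neg hm]
      rw [loop_eq l1 l2 (i+1) count _ hlen (by omega)]
      rw [hdrop]
      have hm' : ¬ (l1[i] = "No" ∧ l2[i] = "No") := by rw [← g1, ← g2]; exact hm
      have hc : (((l1[i], l2[i]) : String × String).1 == "No" && (l1[i], l2[i]).2 == "No") = false := by
        rcases not_and_or.mp hm' with h' | h' <;> simp [h']
      simp [hc]
  · have hie : i = l2.length := by omega
    rw [noCountLoop]
    rw [if_neg h]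
    have hnil : (l1.zip l2).drop i = [] := by
      apply List.drop_eq_nil_of_le; simp [List.length_zip]; omega
    rw [hnil]
    simp [PySem.List.pyRange_one_eq_nil]
termination_by l2.length - i

-- ===== VERDICT (by name: the statement is the Claim_ definition above) =====
theorem no_count_spec : Claim_equal_no_count := by
  intro rp ra k1 k2 _ hpre
  obtain ⟨h1, h2, hlen⟩ := hpre
  obtain ⟨l1, e1⟩ := Option.isSome_iff_exists.mp h1
  obtain ⟨l2, e2⟩ := Option.isSome_iff_exists.mp h2
  rw [e1, e2] at hlen
  simp only [Option.getD_some] at hlen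
  unfold Spec_no_count no_count no_count_alt
  simp only [e1, e2, Option.getD_some]
  rw [loop_eq l1 l2 0 1 [] hlen (Nat.zero_le _)]
  unfold noIdx PySem.Set.inter PySem.Set.len
  simp only [PySem.Set.ofList_eq_self_of_nodup _ (noIdxList_nodup l1 0),
      PySem.Set.ofList_eq_self_of_nodup _ (noIdxList_nodup l2 0)]
  rw [inter_count l1 l2 0 hlen]
  simp only [List.drop_zero, List.nil_append]
  congr 1
  push_cast
  omega
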